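-- pv_equiv track=rewrite | github.com/ymcx/advent-of-code | 2022/13a.py | merge_line
-- ===== SOURCE A (Python) =====
-- def merge_line(line):
--     while True:
--         new = []
--         i = 0
--
--         while i < len(line):
--             if line[i][-1].isalnum() and line[i + 1][0].isalnum():
--                 x = 2
--             else:
--                 x = 1
--
--             item = ",".join(line[i : i + x])
--             new.append(item)
--
--             i += x
--
--         if line == new:
--             return line
--
--         line = new
-- ===== SOURCE B (Python) =====
-- def merge_line(line):
--     out = []
--     i = 0
--     n = len(line)
--     while i < n:
--         j = i
--         while j + 1 < n and line[j][-1].isalnum() and line[j + 1][0].isalnum():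
--             j += 1
--         out.append(",".join(line[i:j + 1]))
--         i = j + 1
--     return out
-- ===== Notes on version B (the rewrite author's own statement) =====
-- stated objective: faster
-- what changed: Replaces A's repeated whole-list passes until a fixpoint with a single left-to-right scan that joins each maximal run of alnum-bounded neighbours at once.
import Mathlib
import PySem

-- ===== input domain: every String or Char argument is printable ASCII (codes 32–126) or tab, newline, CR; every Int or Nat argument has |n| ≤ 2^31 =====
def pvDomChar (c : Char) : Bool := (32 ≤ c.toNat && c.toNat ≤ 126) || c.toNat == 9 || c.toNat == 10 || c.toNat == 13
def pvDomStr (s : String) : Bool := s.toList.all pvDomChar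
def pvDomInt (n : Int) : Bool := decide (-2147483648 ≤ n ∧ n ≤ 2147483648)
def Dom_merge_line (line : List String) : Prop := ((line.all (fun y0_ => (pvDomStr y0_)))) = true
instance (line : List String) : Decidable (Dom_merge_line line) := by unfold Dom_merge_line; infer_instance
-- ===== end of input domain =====

-- B replaces A's repeated merge passes to a fixpoint by one linear scan joining each
-- maximal alnum-bounded run at once; same return values on Pre_.


-- ===== PORT A =====
-- s[-1] : none = IndexError on the empty string (exact: PySem.List.pyGet? s (-1) = s.toList.getLast?)
def pvLast (s : String) : Option Char := s.toList.getLast?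
-- s[0]
def pvFirst (s : String) : Option Char := s.toList.head?
-- the merge condition `…[-1].isalnum() and …[0].isalnum()`; the `none` (IndexError)
-- cases are excluded by Pre_merge_line, the port takes them as false
def pvChk (a b : Option Char) : Bool := a.any PySem.Chars.isalnum && b.any PySem.Chars.isalnum
-- ",".join(l) — hand port of str.join with a one-char separator (exact)
def joinComma : List String → String
  | [] => ""
  | [a] => a
  | a :: b :: t => a ++ "," ++ joinComma (b :: t)

-- one execution of A's inner `while i < len(line)` loop (i advances by x ∈ {1,2});
-- at the last index with an alnum-ending item Python raises IndexError on line[i+1]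
-- (excluded by Pre_merge_line), the port keeps the item
def passA : List String → List String
  | [] => []
  | [a] => [a]
  | a :: b :: t =>
    if pvChk (pvLast a) (pvFirst b) then joinComma [a, b] :: passA t
    else a :: passA (b :: t)

theorem passA_length_le : ∀ l : List String, (passA l).length ≤ l.length := by
  intro l
  induction l using passA.induct with
  | case1 => simp [passA]
  | case2 a => simp [passA]
  | case3 a b t h ih => simp [passA, h, List.length_cons] at ih ⊢; omega
  | case4 a b t h ih => simp [passA, h, List.length_cons] at ih ⊢; omega

theorem passA_progress : ∀ l : List String, passA l = l ∨ (passA l).length < l.length := by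
  intro l
  induction l using passA.induct with
  | case1 => left; rfl
  | case2 a => left; rfl
  | case3 a b t h ih =>
    right
    have := passA_length_le t
    simp [passA, h, List.length_cons]; omega
  | case4 a b t h ih =>
    rcases ih with heq | hlt
    · left; simp [passA, h, heq]
    · right; simp [passA, h, List.length_cons] at hlt ⊢; omega

-- A's outer `while True` loop: repeat passes until the list stops changing
def merge_line (line : List String) : List String :=
  let new := passA line
  if line = new then line else merge_line new
termination_by line.length
decreasing_by
  rename_i h
  rcases passA_progress line with heq | hlt
  · exact absurd heq.symm h
  · exact hlt

-- ===== PORT B =====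
-- B's inner `while j + 1 < n and line[j][-1].isalnum() and line[j+1][0].isalnum()` loop:
-- cur is line[j]; returns (the items the run takes beyond cur, the rest of the list)
def runB (cur : String) : List String → List String × List String
  | [] => ([], [])
  | b :: rest =>
    if pvChk (pvLast cur) (pvFirst b) then
      let p := runB b rest
      (b :: p.1, p.2)
    else ([], b :: rest)

theorem runB_snd_length_le : ∀ (l : List String) (cur : String), (runB cur l).2.length ≤ l.length := by
  intro l
  induction l with
  | nil => intro cur; simp [runB]
  | cons b rest ih =>
    intro cur
    by_cases h : pvChk (pvLast cur) (pvFirst b) = true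
    · simp [runB, h]; have := ih b; omega
    · simp [runB, h]

-- B's outer loop: take one maximal run, join it, continue after it
def merge_line_alt : List String → List String
  | [] => []
  | a :: rest =>
    let p := runB a rest
    joinComma (a :: p.1) :: merge_line_alt p.2
termination_by l => l.length
decreasing_by
  have := runB_snd_length_le rest a
  simp at *; omega

-- ===== PRECONDITION & SPEC =====
-- Pre_ excludes exactly the inputs on which Python A raises IndexError: a list containing
-- an empty string (line[i][-1] / line[i+1][0] on ""), or whose last element ends in an
-- alphanumeric character (then the final no-merge pass evaluates line[i+1] at the last index).
def Pre_merge_line (line : List String) : Prop :=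
  (∀ s ∈ line, s ≠ "") ∧ ((pvLast (line.getLastD "")).any PySem.Chars.isalnum = false)
instance (line : List String) : Decidable (Pre_merge_line line) := by
  unfold Pre_merge_line; infer_instance
def pvWitness_merge_line : List String := ["ab", "1", "c."]
def Spec_merge_line (line : List String) (out : List String) : Prop := out = merge_line_alt line
instance (line : List String) (out : List String) : Decidable (Spec_merge_line line out) := by unfold Spec_merge_line; infer_instance

-- ===== CLAIM (what is proved, stated in full; the proofs are below) =====
def Claim_equal_merge_line : Prop := ∀ (line : List String), Dom_merge_line line → Pre_merge_line line → Spec_merge_line line (merge_line line)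

-- ===== LEMMAS AND PROOFS =====

theorem toList_ne_nil {s : String} (h : s ≠ "") : s.toList ≠ [] := by
  intro h'; apply h; cases s; simp_all

theorem pvLast_join {a b : String} (hb : b ≠ "") : pvLast (joinComma [a, b]) = pvLast b := by
  rcases List.exists_cons_of_ne_nil (toList_ne_nil hb) with ⟨c, cs, hc⟩
  simp [pvLast, joinComma, hc, List.getLast?_append]
  rw [Option.or_of_isSome (by simp)]

theorem pvFirst_join {a b : String} (ha : a ≠ "") : pvFirst (joinComma [a, b]) = pvFirst a := by
  rcases List.exists_cons_of_ne_nil (toList_ne_nil ha) with ⟨c, cs, hc⟩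
  simp [pvFirst, joinComma, hc]

theorem joinComma_join_cons (a b : String) (t : List String) :
    joinComma (joinComma [a, b] :: t) = joinComma (a :: b :: t) := by
  cases t with
  | nil => rfl
  | cons x xs => simp [joinComma, String.append_assoc]

theorem joinComma_cons_cons (a b : String) (t : List String) :
    joinComma (a :: b :: t) = a ++ "," ++ joinComma (b :: t) := rfl

theorem runB_congr {c c' : String} (h : pvLast c = pvLast c') (l : List String) :
    runB c l = runB c' l := by
  cases l with
  | nil => rfl
  | cons b rest => simp [runB, h]

theorem runB_snd_sublist : ∀ (l : List String) (c : String), (runB c l).2.Sublist l := by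
  intro l
  induction l with
  | nil => intro c; simp [runB]
  | cons b rest ih =>
    intro c
    by_cases h : pvChk (pvLast c) (pvFirst b) = true
    · simp [runB, h]; exact (ih b).cons b
    · simp [runB, h]

theorem passA_ne_empty : ∀ l : List String, (∀ s ∈ l, s ≠ "") → ∀ s ∈ passA l, s ≠ "" := by
  intro l
  induction l using passA.induct with
  | case1 => simp [passA]
  | case2 a => simp [passA]
  | case3 a b t h ih =>
    intro hne s hs
    simp [passA, h] at hs
    rcases hs with rfl | hs
    · intro he
      have h2 : (joinComma [a, b]).toList = a.toList ++ ',' :: b.toList := by simp [joinComma]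
      rw [he] at h2; simp at h2
    · exact ih (fun x hx => hne x (by simp [hx])) s hs
  | case4 a b t h ih =>
    intro hne s hs
    simp [passA, h] at hs
    rcases hs with rfl | hs
    · exact hne s (by simp)
    · exact ih (fun x hx => hne x (by simp at hx ⊢; tauto)) s hs

theorem passA_cons_exists {b : String} (rest : List String) (hb : b ≠ "") :
    ∃ h t, passA (b :: rest) = h :: t ∧ pvFirst h = pvFirst b := by
  cases rest with
  | nil => exact ⟨b, [], rfl, rfl⟩
  | cons c rs =>
    by_cases hbc : pvChk (pvLast b) (pvFirst c) = true
    · exact ⟨joinComma [b, c], passA rs, by simp [passA, hbc], pvFirst_join hb⟩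
    · exact ⟨b, passA (c :: rs), by simp [passA, hbc], rfl⟩

theorem merge_line_alt_nil : merge_line_alt [] = [] := by
  rw [merge_line_alt]

theorem merge_line_alt_cons (a : String) (rest : List String) :
    merge_line_alt (a :: rest)
      = joinComma (a :: (runB a rest).1) :: merge_line_alt (runB a rest).2 := by
  rw [merge_line_alt]

theorem merge_line_eq (l : List String) :
    merge_line l = if l = passA l then l else merge_line (passA l) := by
  rw [merge_line]

-- at a fixpoint of passA no adjacent pair merges, so B returns the list unchanged
theorem alt_of_fix : ∀ l : List String, passA l = l → merge_line_alt l = l := by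
  intro l
  induction l using passA.induct with
  | case1 => intro _; exact merge_line_alt_nil
  | case2 a => intro _; simp [merge_line_alt_cons, merge_line_alt_nil, runB, joinComma]
  | case3 a b t h ih =>
    intro heq
    exfalso
    have hlen := congrArg List.length heq
    have := passA_length_le t
    simp [passA, h, List.length_cons] at hlen
    omega
  | case4 a b t h ih =>
    intro heq
    simp only [passA, h] at heq
    simp at heq
    rw [merge_line_alt_cons]
    simp [runB, h]
    exact ⟨rfl, ih heq⟩

-- the key invariant: running B's inner loop over a merged pass gives the same joined
-- text and a remainder that is the merged image of the original remainder
theorem runB_passA : ∀ (n : Nat) (l : List String), l.length ≤ n → (∀ s ∈ l, s ≠ "") →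
    ∀ p : String,
      (runB p (passA l)).2 = passA ((runB p l).2) ∧
      ∀ x : String, joinComma (x :: (runB p (passA l)).1) = joinComma (x :: (runB p l).1) := by
  intro n
  induction n with
  | zero =>
    intro l hl _ p
    rcases l with _ | ⟨b, t⟩
    · simp [passA, runB]
    · simp at hl
  | succ n ih =>
    intro l hl hne p
    rcases l with _ | ⟨b, _ | ⟨c0, rest⟩⟩
    · simp [passA, runB]
    · by_cases hb : pvChk (pvLast p) (pvFirst b) = true <;> simp [passA, runB, hb]
    · have hb : b ≠ "" := hne b (by simp)
      have hc0 : c0 ≠ "" := hne c0 (by simp)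
      have hlrest : rest.length ≤ n := by simp [List.length_cons] at hl; omega
      have hnerest : ∀ s ∈ rest, s ≠ "" := fun s hs => hne s (by simp [hs])
      by_cases hbc : pvChk (pvLast b) (pvFirst c0) = true
      · have hpass : passA (b :: c0 :: rest) = joinComma [b, c0] :: passA rest := by
          simp [passA, hbc]
        by_cases hp : pvChk (pvLast p) (pvFirst b) = true
        · obtain ⟨ih2, ih1⟩ := ih rest hlrest hnerest c0
          have hcongr : runB (joinComma [b, c0]) (passA rest) = runB c0 (passA rest) :=
            runB_congr (pvLast_join hc0) (passA rest)
          constructor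
          · simp [hpass, runB, pvFirst_join hb, hp, hcongr, hbc, ih2]
          · intro x
            simp only [hpass, runB, pvFirst_join hb, hp, hcongr, hbc, if_pos]
            simp [joinComma_cons_cons, ih1]
            rw [show b ++ "," ++ joinComma [c0] = joinComma [b, c0] from rfl,
              joinComma_join_cons, joinComma_cons_cons]
        · constructor
          · simp [hpass, runB, pvFirst_join hb, hp]
          · intro x; simp [hpass, runB, pvFirst_join hb, hp]
      · have hpass : passA (b :: c0 :: rest) = b :: passA (c0 :: rest) := by
          simp [passA, hbc]
        have hl2 : (c0 :: rest).length ≤ n := by simp at hl ⊢; omega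
        have hne2 : ∀ s ∈ c0 :: rest, s ≠ "" := fun s hs => hne s (by simp at hs ⊢; tauto)
        by_cases hp : pvChk (pvLast p) (pvFirst b) = true
        · obtain ⟨ih2, ih1⟩ := ih (c0 :: rest) hl2 hne2 b
          constructor
          · simp [hpass, runB, hp, hbc, ih2]
          · intro x; simp [hpass, runB, hp, hbc, joinComma_cons_cons, ih1]
        · constructor
          · simp [hpass, runB, hp]
          · intro x; simp [hpass, runB, hp]

-- one pass of A does not change B's result
theorem alt_passA : ∀ (n : Nat) (l : List String), l.length ≤ n → (∀ s ∈ l, s ≠ "") →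
    merge_line_alt (passA l) = merge_line_alt l := by
  intro n
  induction n with
  | zero =>
    intro l hl _
    rcases l with _ | ⟨b, t⟩
    · rfl
    · simp at hl
  | succ n ih =>
    intro l hl hne
    rcases l with _ | ⟨a, _ | ⟨b, rest⟩⟩
    · rfl
    · rfl
    · have ha : a ≠ "" := hne a (by simp)
      have hb : b ≠ "" := hne b (by simp)
      have hlrest : rest.length ≤ n := by simp [List.length_cons] at hl; omega
      have hnerest : ∀ s ∈ rest, s ≠ "" := fun s hs => hne s (by simp [hs])
      by_cases hab : pvChk (pvLast a) (pvFirst b) = true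
      · have hpass : passA (a :: b :: rest) = joinComma [a, b] :: passA rest := by
          simp [passA, hab]
        obtain ⟨ih2, ih1⟩ := runB_passA rest.length rest le_rfl hnerest b
        have hcongr : runB (joinComma [a, b]) (passA rest) = runB b (passA rest) :=
          runB_congr (pvLast_join hb) (passA rest)
        rw [hpass, merge_line_alt_cons, merge_line_alt_cons]
        have htail : merge_line_alt (runB (joinComma [a, b]) (passA rest)).2
            = merge_line_alt (runB a (b :: rest)).2 := by
          rw [hcongr, ih2]
          have hsub := runB_snd_sublist rest b
          have := ih (runB b rest).2 (le_trans hsub.length_le hlrest)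
            (fun s hs => hnerest s (hsub.mem hs))
          rw [this]
          simp [runB, hab]
        have hhead : joinComma (joinComma [a, b] :: (runB (joinComma [a, b]) (passA rest)).1)
            = joinComma (a :: (runB a (b :: rest)).1) := by
          rw [hcongr]
          calc joinComma (joinComma [a, b] :: (runB b (passA rest)).1)
              = joinComma (a :: b :: (runB b (passA rest)).1) := joinComma_join_cons a b _
            _ = a ++ "," ++ joinComma (b :: (runB b (passA rest)).1) := rfl
            _ = a ++ "," ++ joinComma (b :: (runB b rest).1) := by rw [ih1 b]
            _ = joinComma (a :: (runB a (b :: rest)).1) := by simp [runB, hab, joinComma_cons_cons]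
        rw [htail, hhead]
      · have hpass : passA (a :: b :: rest) = a :: passA (b :: rest) := by
          simp [passA, hab]
        rcases passA_cons_exists rest hb with ⟨h0, t0, hpt, hfst⟩
        have hchk0 : pvChk (pvLast a) (pvFirst h0) = false := by
          rw [hfst]; exact (Bool.not_eq_true _).mp hab
        rw [hpass, merge_line_alt_cons, merge_line_alt_cons]
        have hq : runB a (passA (b :: rest)) = ([], passA (b :: rest)) := by
          rw [hpt]; simp [runB, hchk0]
        have hr : runB a (b :: rest) = ([], b :: rest) := by simp [runB, hab]
        rw [hq, hr]
        have hl2 : (b :: rest).length ≤ n := by simp at hl ⊢; omega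
        have hne2 : ∀ s ∈ b :: rest, s ≠ "" := fun s hs => hne s (by simp at hs ⊢; tauto)
        rw [ih (b :: rest) hl2 hne2]

theorem merge_eq_alt (l : List String) (hl : ∀ s ∈ l, s ≠ "") :
    merge_line l = merge_line_alt l := by
  rw [merge_line_eq]
  by_cases h : l = passA l
  · rw [if_pos h, alt_of_fix l h.symm]
  · rw [if_neg h]
    rw [merge_eq_alt (passA l) (passA_ne_empty l hl)]
    exact alt_passA l.length l le_rfl hl
termination_by l.length
decreasing_by
  rcases passA_progress l with heq | hlt
  · exact absurd heq.symm h
  · exact hlt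

-- ===== VERDICT (by name: the statement is the Claim_ definition above) =====
theorem merge_line_spec : Claim_equal_merge_line := by
  intro line _ hpre
  unfold Spec_merge_line
  exact merge_eq_alt line hpre.1
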